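/- GENERATED by tools/from_farm_form.py from prooffarm-gif/accepted/DGifGetScreenDesc.2/Proof.lean (a worked proof of the farm's unit `DGifGetScreenDesc.2`,
   accepted by the verdict) — do not edit. -/
import Gif.Spec.Units.DGifGetScreenDesc_2
import Gif.Spec.AllSegs
import Gif.Spec.Proved.DGifGetScreenDesc_2_Lemmas

open X86 X86.User Asan ProgX.Base ProgX.Base.Spec Gif.Spec

/-!
  `DGifGetScreenDesc.2` (0x10813b … 0x108152 and 0x1081d1 … 0x108211, 19 instructions; dgif_lib.c:266-270): A BODY SEGMENT OF A
  PROTECTED FUNCTION WITH TWO CONTRACT CALLS. The return addresses of the two calls (0x10814d `ret6` of InternalRead, 0x1081f6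
  `ret13` of GifFreeMapObject) are made cuts of the unit's own: three walks (Lemmas.lean), chained here.
-/

namespace Gif.Spec.DGifGetScreenDesc_2
end Gif.Spec.DGifGetScreenDesc_2

/-- Segment 2 of `DGifGetScreenDesc` takes `Body` at 0x10813b to `Body` at 0x108152 (three bytes read) or to `Done` at 0x1080f7
(a short read: GIF_ERROR with the entry's heap and forest). -/
theorem Gif.Spec.Proved.DGifGetScreenDesc_2_ok : Gif.Spec.DGifGetScreenDesc_2.Statement := by
  intro Lay hLay μ hμ u₀ hcode h_InternalRead h_GifFreeMapObject h_asan_store4_noabort h_asan_load8_noabort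
    h_asan_store8_noabort H rest frames F R e ret v hat
  -- the callees' contracts for the frame list of the body (the own frame in front): a request of 3 bytes; `free` of NULL (the
  -- ghost map is not used)
  have hir := h_InternalRead H rest (DGifGetScreenDesc.framesIn frames e) F R 3
  have hfm := h_GifFreeMapObject H rest (DGifGetScreenDesc.framesIn frames e) 0 0
  -- 0x10813b … the call of InternalRead … 0x10814d
  refine (Gif.Spec.DGifGetScreenDesc_2.sd2_seg_read Lay hLay μ hμ u₀ hcode H rest frames F R e ret hir v hat).trans ?_
  -- 0x10814d … 0x108152, or … the call of GifFreeMapObject … 0x1081f6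
  intro v1 hv1
  refine (Gif.Spec.DGifGetScreenDesc_2.sd2_seg_branch Lay hLay μ hμ u₀ hcode H rest frames F R e ret hfm
    h_asan_store4_noabort h_asan_load8_noabort v1 hv1).trans ?_
  intro v2 hv2
  rcases hv2 with hbody | hret13
  · -- 0x108152: the exit to segment 3
    exact ReachVia.done (Or.inl hbody)
  · -- 0x1081f6 … 0x1080f7: the exit to the epilogue, with the entry's heap and forest
    refine (Gif.Spec.DGifGetScreenDesc_2.sd2_seg_tail Lay hLay μ hμ u₀ hcode H rest frames F R e ret
      h_asan_store8_noabort v2 hret13).mono ?_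
    intro v3 hv3
    exact Or.inr ⟨H, F, hv3⟩
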